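-- pv_equiv track=rewrite | github.com/dinhlong1/BaiTap | mangsonguyen.py | count_the_number_of_distinct_primes_in_the_array
-- ===== SOURCE A (Python) =====
-- def is_prime_number(target_number):
--
--     # 1, 2, 3 luôn là số nguyên tố
--     if target_number== 1 or target_number== 2 or target_number== 3:
--         return True
--     else:
--         for i in range(2,target_number,1):
--             if target_number % i == 0:
--                 return False
--         return True
--
-- def count_the_number_of_distinct_primes_in_the_array(list):
--     list_has_appeared = []
--     count = 0
--     for i in range(0, len(list)):
--         if list[i] in list_has_appeared:
--             continue
--
--         list_has_appeared.append(list[i])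
--         flag = 0
--
--         for t in range(0 , len(list)):
--             if t != i and list[i] == list[t]:
--                 flag =1
--                 break
--
--         if flag == 0 and is_prime_number(list[i]):
--             count += 1
--
--     return count
-- ===== SOURCE B (Python) =====
-- def is_prime_number_fast(n):
--     # matches the original helper: 1, 2, 3 and all n <= 0 yield True
--     # (the original's range(2, n) is empty there); for n >= 4, trial
--     # division bounded by sqrt(n) instead of ranging up to n.
--     if n < 4:
--         return True
--     i = 2
--     while i * i <= n:
--         if n % i == 0:
--             return False
--         i += 1
--     return True
--
-- def count_the_number_of_distinct_primes_in_the_array(list):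
--     counts = {}
--     for x in list:
--         counts[x] = counts.get(x, 0) + 1
--     total = 0
--     for x, c in counts.items():
--         if c == 1 and is_prime_number_fast(x):
--             total += 1
--     return total
-- ===== Notes on version B (the rewrite author's own statement) =====
-- stated objective: faster
-- what changed: Replaces the quadratic duplicate-detection scan with a single counting-dict pass over the list, and replaces trial division up to n in the primality helper with sqrt(n)-bounded trial division (n < 4 returns True exactly as the original's empty/true cases do).
import Mathlib
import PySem

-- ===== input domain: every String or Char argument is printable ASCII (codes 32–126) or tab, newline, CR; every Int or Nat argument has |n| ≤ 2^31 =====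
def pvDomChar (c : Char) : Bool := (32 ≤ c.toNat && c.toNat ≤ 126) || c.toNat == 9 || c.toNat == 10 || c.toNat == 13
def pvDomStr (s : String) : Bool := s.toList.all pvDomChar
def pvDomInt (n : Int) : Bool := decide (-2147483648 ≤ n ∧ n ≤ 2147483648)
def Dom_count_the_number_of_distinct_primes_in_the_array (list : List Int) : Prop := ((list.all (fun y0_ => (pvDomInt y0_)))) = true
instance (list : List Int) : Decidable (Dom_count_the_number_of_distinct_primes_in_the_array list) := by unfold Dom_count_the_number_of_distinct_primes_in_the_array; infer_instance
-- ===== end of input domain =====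

-- B replaces A's quadratic duplicate scan by one counting-dict pass and A's trial division up to n
-- by sqrt(n)-bounded trial division (objective: faster).

-- ===== PORT A =====
def is_prime_number (target_number : Int) : Bool :=
  if target_number == 1 || target_number == 2 || target_number == 3 then true
  else if (PySem.List.pyRange 2 target_number 1).any
        (fun i => PySem.Int.mod target_number i == 0) then false
  else true

def count_the_number_of_distinct_primes_in_the_array (list : List Int) : Int :=
  ((PySem.List.pyRange 0 (list.length : Int) 1).foldl
    (fun (st : List Int × Int) i =>
      let x := PySem.List.pyGetD list i 0
      if st.1.contains x then st
      else
        let seen := st.1 ++ [x]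
        let flag : Int :=
          if (PySem.List.pyRange 0 (list.length : Int) 1).any
              (fun t => decide (t ≠ i) && (x == PySem.List.pyGetD list t 0)) then 1 else 0
        if flag == 0 && is_prime_number x then (seen, st.2 + 1) else (seen, st.2))
    ([], 0)).2

-- ===== PORT B =====
-- 'while i * i <= n' loop; the extra '2 ≤ i' conjunct only makes the recursion
-- well-founded (the loop is always entered at i = 2, where it is true throughout).
def pvTrial (n i : Int) : Bool :=
  if h : 2 ≤ i ∧ i * i ≤ n then
    if PySem.Int.mod n i == 0 then false else pvTrial n (i + 1)
  else true
termination_by (n + 1 - i).toNat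
decreasing_by
  have h2 : 2 * i ≤ i * i := by nlinarith [h.1]
  omega

def is_prime_number_fast (n : Int) : Bool :=
  if n < 4 then true else pvTrial n 2

def count_the_number_of_distinct_primes_in_the_array_alt (list : List Int) : Int :=
  let counts := list.foldl (fun (d : PySem.Dict Int Int) x => d.insert x (d.getD x 0 + 1)) PySem.Dict.empty
  counts.items.foldl
    (fun total p => if p.2 == 1 && is_prime_number_fast p.1 then total + 1 else total) 0

-- ===== PRECONDITION & SPEC =====
def Spec_count_the_number_of_distinct_primes_in_the_array (list : List Int) (out : Int) : Prop := out = count_the_number_of_distinct_primes_in_the_array_alt list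
instance (list : List Int) (out : Int) : Decidable (Spec_count_the_number_of_distinct_primes_in_the_array list out) := by unfold Spec_count_the_number_of_distinct_primes_in_the_array; infer_instance

-- ===== CLAIM (what is proved, stated in full; the proofs are below) =====
def Claim_equal_count_the_number_of_distinct_primes_in_the_array : Prop := ∀ (list : List Int), Dom_count_the_number_of_distinct_primes_in_the_array list → Spec_count_the_number_of_distinct_primes_in_the_array list (count_the_number_of_distinct_primes_in_the_array list)

-- ===== LEMMAS AND PROOFS =====

lemma pvTrial_spec (n : Int) : ∀ (i : Int), 2 ≤ i →
    (pvTrial n i = true ↔ ∀ j : Int, i ≤ j → j * j ≤ n → ¬ (j ∣ n)) := by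
  have main : ∀ (m : Nat) (i : Int), (n + 1 - i).toNat = m → 2 ≤ i →
      (pvTrial n i = true ↔ ∀ j : Int, i ≤ j → j * j ≤ n → ¬ (j ∣ n)) := by
    intro m
    induction m using Nat.strong_induction_on with
    | _ m IH =>
      intro i hm h2
      rw [pvTrial]
      by_cases hc : 2 ≤ i ∧ i * i ≤ n
      · rw [dif_pos hc]
        by_cases hd : PySem.Int.mod n i = 0
        · simp only [hd, BEq.rfl, if_true]
          have hdvd : i ∣ n := (PySem.Int.mod_eq_zero_iff_dvd n i).mp hd
          constructor
          · intro hf; exact absurd hf (by simp)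
          · intro hall; exact absurd hdvd (hall i le_rfl hc.2)
        · have hne : (PySem.Int.mod n i == 0) = false := by simpa using hd
          rw [hne]; simp only [Bool.false_eq_true, if_false]
          have hmeas : (n + 1 - (i + 1)).toNat < m := by
            have h2' : 2 * i ≤ i * i := by nlinarith [hc.1]
            omega
          rw [IH _ hmeas (i + 1) rfl (by omega)]
          constructor
          · intro hall j hij hjn
            rcases eq_or_lt_of_le hij with heq | hlt
            · intro hdvd
              subst heq
              exact hd ((PySem.Int.mod_eq_zero_iff_dvd n i).mpr hdvd)
            · exact hall j (by omega) hjn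
          · intro hall j hij hjn; exact hall j (by omega) hjn
      · rw [dif_neg hc]
        have hin : n < i * i := by
          rcases not_and_or.mp hc with h | h
          · omega
          · omega
        constructor
        · intro _ j hij hjn
          have : i * i ≤ j * j := by nlinarith
          omega
        · intro _; rfl
  intro i h2; exact main _ i rfl h2

lemma small_divisor (n : Int) (h4 : 4 ≤ n) :
    (∃ j : Int, 2 ≤ j ∧ j < n ∧ j ∣ n) ↔ (∃ j : Int, 2 ≤ j ∧ j * j ≤ n ∧ j ∣ n) := by
  constructor
  · rintro ⟨j, h2, hjn, k, hk⟩
    have hj0 : 0 < j := by omega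
    have hk2 : 2 ≤ k := by nlinarith
    by_cases hsq : j * j ≤ n
    · exact ⟨j, h2, hsq, k, hk⟩
    · have hkj : k < j := by nlinarith
      exact ⟨k, hk2, by nlinarith, j, by linarith [hk]; ⟩
  · rintro ⟨j, h2, hsq, hdvd⟩
    exact ⟨j, h2, by nlinarith, hdvd⟩

lemma prime_eq (n : Int) : is_prime_number n = is_prime_number_fast n := by
  unfold is_prime_number is_prime_number_fast
  by_cases h123 : n = 1 ∨ n = 2 ∨ n = 3
  · have hb : (n == 1 || n == 2 || n == 3) = true := by
      rcases h123 with h | h | h <;> simp [h]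
    rw [hb]
    simp only [if_true]
    have : n < 4 := by rcases h123 with h | h | h <;> omega
    rw [if_pos this]
  · have hb : (n == 1 || n == 2 || n == 3) = false := by
      simp only [Bool.or_eq_false_iff, beq_eq_false_iff_ne]
      refine ⟨⟨?_, ?_⟩, ?_⟩ <;> intro h <;> exact h123 (by omega)
    rw [hb]
    simp only [Bool.false_eq_true, if_false]
    by_cases h4 : n < 4
    · have hnil : PySem.List.pyRange 2 n 1 = [] :=
        PySem.List.pyRange_one_eq_nil (by omega)
      rw [hnil]
      simp [h4]
    · rw [if_neg h4]
      push Not at h4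
      apply Bool.eq_iff_iff.mpr
      rw [(pvTrial_spec n 2 le_rfl)]
      constructor
      · intro hA
        have hnoany : ¬ ((PySem.List.pyRange 2 n 1).any
            (fun i => PySem.Int.mod n i == 0) = true) := by
          intro hany; rw [if_pos hany] at hA; exact absurd hA (by simp)
        intro j h2j hsq hdvd
        apply hnoany
        rw [List.any_eq_true]
        have hjn : j < n := by nlinarith
        refine ⟨j, ?_, ?_⟩
        · rw [PySem.List.mem_pyRange_one]; omega
        · simpa using (PySem.Int.mod_eq_zero_iff_dvd n j).mpr hdvd
      · intro hB
        have hnoany : ((PySem.List.pyRange 2 n 1).any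
            (fun i => PySem.Int.mod n i == 0)) = false := by
          rw [Bool.eq_false_iff, Ne, List.any_eq_true]
          rintro ⟨j, hmem, hmod⟩
          rw [PySem.List.mem_pyRange_one] at hmem
          have hdvd : j ∣ n := (PySem.Int.mod_eq_zero_iff_dvd n j).mp (by simpa using hmod)
          rcases (small_divisor n h4).mp ⟨j, hmem.1, hmem.2, hdvd⟩ with ⟨k, hk2, hksq, hkdvd⟩
          exact hB k hk2 hksq hkdvd
        rw [hnoany]
        simp

lemma exists_other_index (l : List Int) (i : Nat) (h : i < l.length) :
    (∃ t : Nat, ∃ ht : t < l.length, t ≠ i ∧ l[t] = l[i]) ↔ 1 < l.count l[i] := by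
  obtain ⟨x, hx⟩ : ∃ x, l[i] = x := ⟨_, rfl⟩
  rw [hx]
  have hsplit : l = l.take i ++ x :: l.drop (i + 1) := by
    conv_lhs => rw [← List.take_append_drop i l]
    rw [← List.getElem_cons_drop h, hx]
  have hlen : (l.take i).length = i := List.length_take_of_le (by omega)
  have hcnt : l.count x = (l.take i).count x + 1 + (l.drop (i + 1)).count x := by
    conv_lhs => rw [hsplit]
    rw [List.count_append, List.count_cons_self]
    omega
  constructor
  · rintro ⟨t, ht, hne, heq⟩
    have hmem : x ∈ l.take i ∨ x ∈ l.drop (i + 1) := by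
      rcases Nat.lt_or_ge t i with hlt | hge
      · left
        rw [← heq]
        exact List.mem_take_iff_getElem.mpr ⟨t, by omega, by simp⟩
      · right
        rw [← heq]
        have hb : t - (i + 1) < (l.drop (i + 1)).length := by
          rw [List.length_drop]; omega
        have : l[t] = (l.drop (i + 1))[t - (i + 1)]'hb := by
          rw [List.getElem_drop]; congr 1; omega
        rw [this]
        exact List.getElem_mem _
    rcases hmem with hm | hm
    · have := List.count_pos_iff.mpr hm
      omega
    · have := List.count_pos_iff.mpr hm
      omega
  · intro hcount
    have hmem : x ∈ l.take i ∨ x ∈ l.drop (i + 1) := by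
      by_contra hno
      push Not at hno
      have h1 : (l.take i).count x = 0 := List.count_eq_zero.mpr hno.1
      have h2 : (l.drop (i + 1)).count x = 0 := List.count_eq_zero.mpr hno.2
      omega
    rcases hmem with hm | hm
    · rcases List.mem_take_iff_getElem.mp hm with ⟨t, ht, heq⟩
      exact ⟨t, by omega, by omega, by rw [← heq]⟩
    · rcases List.getElem_of_mem hm with ⟨t, ht, heq⟩
      refine ⟨i + 1 + t, by rw [List.length_drop] at ht; omega, by omega, ?_⟩
      rw [← heq, List.getElem_drop]

lemma flag_eq (l : List Int) (i : Nat) (h : i < l.length) :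
    ((PySem.List.pyRange 0 (l.length : Int) 1).any
        (fun t => decide (t ≠ (i : Int)) && (l[i] == PySem.List.pyGetD l t 0)))
      = decide (1 < l.count l[i]) := by
  by_cases hcc : 1 < l.count l[i]
  case neg =>
    simp only [hcc, decide_false]
    rw [Bool.eq_false_iff, Ne, List.any_eq_true]
    rintro ⟨t, hmem, ht⟩
    rw [PySem.List.mem_pyRange_one] at hmem
    simp only [Bool.and_eq_true, decide_eq_true_eq, beq_iff_eq] at ht
    have hb : t.toNat < l.length := by omega
    have hx : l[i] = l[t.toNat] := by
      rw [ht.2, PySem.List.pyGetD_eq_getElem l 0 hmem.1 (by omega)]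
    exact hcc ((exists_other_index l i h).mp ⟨t.toNat, hb, by omega, hx.symm⟩)
  case pos =>
    simp only [hcc, decide_true]
    rw [List.any_eq_true]
    rcases (exists_other_index l i h).mpr hcc with ⟨t, ht, hne, heq⟩
    refine ⟨(t : Int), ?_, ?_⟩
    · rw [PySem.List.mem_pyRange_one]; omega
    · simp only [Bool.and_eq_true, decide_eq_true_eq, beq_iff_eq]
      refine ⟨by omega, ?_⟩
      rw [PySem.List.pyGetD_eq_getElem l 0 (by omega) (by simpa using ht)]
      simp [heq]

lemma foldl_range_getD {σ : Type} (l : List Int) (g : σ → Int → σ) (init : σ) :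
    (List.range l.length).foldl (fun s n => g s (l.getD n 0)) init = l.foldl g init := by
  induction l using List.reverseRecOn generalizing init with
  | nil => simp
  | append_singleton l a IH =>
    rw [List.length_append, List.length_singleton, List.range_succ, List.foldl_append,
      List.foldl_append]
    have hcong : (List.range l.length).foldl (fun s n => g s ((l ++ [a]).getD n 0)) init
        = (List.range l.length).foldl (fun s n => g s (l.getD n 0)) init := by
      apply PySem.List.foldl_congr_mem
      intro acc n hn
      rw [List.mem_range] at hn
      rw [List.getD_append _ _ _ _ hn]
    rw [hcong, IH]
    simp

lemma update_prefix (l s : List Int) : ∃ r, PySem.Set.update s l = s ++ r := by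
  induction l generalizing s with
  | nil => exact ⟨[], by rw [List.append_nil]; rfl⟩
  | cons x l IH =>
    have hstep : PySem.Set.update s (x :: l) = PySem.Set.update (PySem.Set.add s x) l := rfl
    rcases IH (PySem.Set.add s x) with ⟨r, hr⟩
    by_cases hc : x ∈ s
    · have hadd : PySem.Set.add s x = s := by simp [PySem.Set.add, hc]
      exact ⟨r, by rw [hstep, hr, hadd]⟩
    · have hadd : PySem.Set.add s x = s ++ [x] := by simp [PySem.Set.add, hc]
      exact ⟨x :: r, by rw [hstep, hr, hadd, List.append_assoc, List.singleton_append]⟩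

lemma foldl_dedup (l : List Int) (f : Int → Int) (seen : List Int) (c : Int) :
    l.foldl (fun (st : List Int × Int) x =>
        if st.1.contains x then st else (st.1 ++ [x], st.2 + f x)) (seen, c)
      = (PySem.Set.update seen l,
         c + (((PySem.Set.update seen l).drop seen.length).map f).sum) := by
  induction l generalizing seen c with
  | nil => simp [PySem.Set.update]
  | cons x l IH =>
    have hstep : PySem.Set.update seen (x :: l) = PySem.Set.update (PySem.Set.add seen x) l := rfl
    rw [List.foldl_cons, hstep]
    by_cases hc : x ∈ seen
    · have hadd : PySem.Set.add seen x = seen := by simp [PySem.Set.add, hc]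
      rw [if_pos (by simpa using hc)]
      rw [IH, hadd]
    · have hadd : PySem.Set.add seen x = seen ++ [x] := by simp [PySem.Set.add, hc]
      rw [if_neg (by simpa using hc)]
      rw [IH, hadd]
      rcases update_prefix l (seen ++ [x]) with ⟨r, hr⟩
      rw [hr]
      have e1 : List.drop (seen ++ [x]).length ((seen ++ [x]) ++ r) = r := List.drop_left
      have e2 : List.drop seen.length ((seen ++ [x]) ++ r) = x :: r := by
        rw [List.append_assoc, List.singleton_append]
        exact List.drop_left
      rw [Prod.mk.injEq]
      refine ⟨rfl, ?_⟩
      rw [e1, e2, List.map_cons, List.sum_cons]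
      ring


lemma countA_eq_sum (l : List Int) :
    count_the_number_of_distinct_primes_in_the_array l
      = ((PySem.Set.ofList l).map (fun x =>
          if (!decide (1 < l.count x)) && is_prime_number x then (1 : Int) else 0)).sum := by
  unfold count_the_number_of_distinct_primes_in_the_array
  have hcong := PySem.List.foldl_congr_mem (PySem.List.pyRange 0 (l.length : Int) 1)
      (fun (st : List Int × Int) (i : Int) =>
        let x := PySem.List.pyGetD l i 0
        if st.1.contains x then st
        else
          let seen := st.1 ++ [x]
          let flag : Int :=
            if (PySem.List.pyRange 0 (l.length : Int) 1).any
                (fun t => decide (t ≠ i) && (x == PySem.List.pyGetD l t 0)) then 1 else 0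
          if flag == 0 && is_prime_number x then (seen, st.2 + 1) else (seen, st.2))
      (fun (st : List Int × Int) (i : Int) =>
        if st.1.contains (l.getD i.toNat 0) then st
        else (st.1 ++ [l.getD i.toNat 0], st.2 +
          (if (!decide (1 < l.count (l.getD i.toNat 0))) && is_prime_number (l.getD i.toNat 0)
           then (1 : Int) else 0)))
      (([], 0) : List Int × Int) ?_
  · rw [hcong, PySem.List.pyRange_zero_nat, List.foldl_map]
    simp only [Int.toNat_natCast]
    refine ((congrArg Prod.snd (foldl_range_getD l (fun (st : List Int × Int) x =>
        if st.1.contains x then st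
        else (st.1 ++ [x], st.2 +
          (if (!decide (1 < l.count x)) && is_prime_number x then (1 : Int) else 0)))
      ([], 0))).trans ?_)
    rw [foldl_dedup]
    have hof : PySem.Set.update ([] : List Int) l = PySem.Set.ofList l := by
      rw [PySem.Set.ofList_eq_foldl]; rfl
    rw [hof]
    simp
  · intro acc i hi
    rw [PySem.List.mem_pyRange_one] at hi
    obtain ⟨n, rfl⟩ : ∃ n : Nat, i = (n : Int) := ⟨i.toNat, (Int.toNat_of_nonneg hi.1).symm⟩
    have hn : n < l.length := by exact_mod_cast hi.2
    have hget : l.getD n 0 = l[n] := List.getD_eq_getElem l 0 hn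
    simp only [PySem.List.pyGetD_natCast, Int.toNat_natCast, hget, flag_eq l n hn]
    by_cases hc : acc.1.contains l[n]
    · rw [if_pos hc, if_pos hc]
    · rw [if_neg hc, if_neg hc]
      rcases Bool.eq_false_or_eq_true (decide (1 < l.count l[n])) with hb | hb <;>
        rcases Bool.eq_false_or_eq_true (is_prime_number l[n]) with hp | hp <;>
          simp [hb, hp]

lemma countB_eq_countP (l : List Int) :
    count_the_number_of_distinct_primes_in_the_array_alt l
      = ((PySem.Set.ofList l).countP (fun x =>
          ((l.count x : Int) == 1) && is_prime_number_fast x) : Int) := by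
  unfold count_the_number_of_distinct_primes_in_the_array_alt
  dsimp only
  rw [PySem.Dict.foldl_insert_getD_add_one_eq_counter, PySem.Dict.items_counter,
    List.foldl_map, PySem.List.foldl_if_add_one
      (fun x => ((l.count x : Int) == 1) && is_prime_number_fast x) (PySem.Set.ofList l) 0]
  simp

-- ===== VERDICT (by name: the statement is the Claim_ definition above) =====
theorem count_the_number_of_distinct_primes_in_the_array_spec : Claim_equal_count_the_number_of_distinct_primes_in_the_array := by
  intro l _
  unfold Spec_count_the_number_of_distinct_primes_in_the_array
  rw [countA_eq_sum, countB_eq_countP, PySem.List.sum_map_ite_one_zero]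
  congr 1
  apply List.countP_congr
  intro x hx
  have hmem : x ∈ l := (PySem.Set.mem_ofList l x).mp hx
  have hpos : 0 < l.count x := List.count_pos_iff.mpr hmem
  rw [prime_eq]
  by_cases h1 : l.count x = 1
  · simp [h1]
  · have : 1 < l.count x := by omega
    simp [this]
    omega
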